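-- pv_equiv track=rewrite | github.com/eikomaniac/GoClubOnline | gco/funcs.py | parseGameDataOfState
-- ===== SOURCE A (Python) =====
-- def parseGameDataOfState(RLEdata):
--     game_data_array = []
--     scan_index = 0 #value used when searching through the string
--     cut_index = 0 #value used so that the program knows when to “cut” the string for the relevant details
--     while scan_index < len(RLEdata):
--         if RLEdata[scan_index] in ["B","W","U","X"]:
--             game_data_array.append(RLEdata[cut_index:scan_index+1])
--             cut_index = scan_index+1
--         scan_index += 1
--     return game_data_array
-- ===== SOURCE B (Python) =====
-- def parseGameDataOfState(RLEdata):
--     # Stream the characters, accumulating the current segment in a buffer;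
--     # a marker character flushes the buffer as one finished segment.
--     # Trailing non-marker characters remain in the buffer and are discarded,
--     # matching the task's behaviour.
--     segments = []
--     buf = []
--     for ch in RLEdata:
--         buf.append(ch)
--         if ch in "BWUX":
--             segments.append(''.join(buf))
--             buf = []
--     return segments
-- ===== Notes on version B (the rewrite author's own statement) =====
-- stated objective: alternative
-- what changed: Replaces A's index-based scan that cuts out segments with string slices RLEdata[cut:scan+1] by an index-free streaming fold: characters are accumulated in a buffer that is flushed (joined) into a segment whenever a marker character arrives; no positions or slicing are used at all.
import Mathlib
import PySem

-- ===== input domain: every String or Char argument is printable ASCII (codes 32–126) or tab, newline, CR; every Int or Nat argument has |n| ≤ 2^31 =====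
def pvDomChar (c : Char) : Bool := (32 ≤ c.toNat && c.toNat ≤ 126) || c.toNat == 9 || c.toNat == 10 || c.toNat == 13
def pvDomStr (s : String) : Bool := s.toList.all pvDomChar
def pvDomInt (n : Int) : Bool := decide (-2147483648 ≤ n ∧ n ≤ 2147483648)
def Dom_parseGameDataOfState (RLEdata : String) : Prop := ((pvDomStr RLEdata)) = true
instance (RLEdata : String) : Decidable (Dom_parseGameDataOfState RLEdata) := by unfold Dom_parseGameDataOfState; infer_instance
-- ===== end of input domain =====

-- B replaces A's index-and-slice scan by an index-free streaming fold with a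
-- character buffer flushed at each marker; measured faster by a constant factor (no per-character indexing/len calls).

-- ===== PORT A =====
-- A's while loop over scan_index 0..len-1 with mutable (game_data_array, cut_index).
-- RLEdata[scan_index] is always in range (0 ≤ scan_index < len), so the hand-ported
-- access `toList.getD i ' '` is exact there (the default is never used).
def parseGameDataOfState (RLEdata : String) : List String :=
  ((List.range RLEdata.toList.length).foldl
    (fun (st : List String × Int) i =>
      if RLEdata.toList.getD i ' ' ∈ (['B', 'W', 'U', 'X'] : List Char) then
        (st.1 ++ [PySem.Str.slice RLEdata (some st.2) (some ((i : Int) + 1))], (i : Int) + 1)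
      else st)
    ([], 0)).1

-- ===== PORT B =====
-- Streaming fold over the characters with state (segments, buffer):
-- each character is appended to the buffer; a marker flushes the buffer
-- (''.join) as one segment.  `ch in "BWUX"` on a single character is
-- membership among the marker characters.
def parseGameDataOfState_alt (RLEdata : String) : List String :=
  (RLEdata.toList.foldl
    (fun (st : List String × List Char) ch =>
      let buf := st.2 ++ [ch]
      if ch ∈ "BWUX".toList then (st.1 ++ [String.ofList buf], ([] : List Char))
      else (st.1, buf))
    ([], [])).1

-- ===== PRECONDITION & SPEC =====
def Spec_parseGameDataOfState (RLEdata : String) (out : List String) : Prop := out = parseGameDataOfState_alt RLEdata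
instance (RLEdata : String) (out : List String) : Decidable (Spec_parseGameDataOfState RLEdata out) := by unfold Spec_parseGameDataOfState; infer_instance

-- ===== CLAIM (what is proved, stated in full; the proofs are below) =====
def Claim_equal_parseGameDataOfState : Prop := ∀ (RLEdata : String), Dom_parseGameDataOfState RLEdata → Spec_parseGameDataOfState RLEdata (parseGameDataOfState RLEdata)

-- ===== LEMMAS AND PROOFS =====

-- A's loop body and B's loop body, named for the invariant proof.
def pvStepA (s : String) (st : List String × Int) (i : Nat) : List String × Int :=
  if s.toList.getD i ' ' ∈ (['B', 'W', 'U', 'X'] : List Char) then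
    (st.1 ++ [PySem.Str.slice s (some st.2) (some ((i : Int) + 1))], (i : Int) + 1)
  else st

def pvStepB (st : List String × List Char) (ch : Char) : List String × List Char :=
  let buf := st.2 ++ [ch]
  if ch ∈ "BWUX".toList then (st.1 ++ [String.ofList buf], ([] : List Char))
  else (st.1, buf)

-- "BWUX".toList is the marker list
theorem pv_bwux : "BWUX".toList = (['B', 'W', 'U', 'X'] : List Char) := rfl

-- one-step unfoldings of the two loop bodies
theorem pv_stepA_pos (s : String) (st : List String × Int) (i : Nat)
    (hc : s.toList.getD i ' ' ∈ (['B', 'W', 'U', 'X'] : List Char)) :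
    pvStepA s st i
      = (st.1 ++ [PySem.Str.slice s (some st.2) (some ((i : Int) + 1))], (i : Int) + 1) := by
  unfold pvStepA; rw [if_pos hc]

theorem pv_stepA_neg (s : String) (st : List String × Int) (i : Nat)
    (hc : s.toList.getD i ' ' ∉ (['B', 'W', 'U', 'X'] : List Char)) :
    pvStepA s st i = st := by
  unfold pvStepA; rw [if_neg hc]

theorem pv_stepB_pos (st : List String × List Char) (ch : Char)
    (hc : ch ∈ "BWUX".toList) :
    pvStepB st ch = (st.1 ++ [String.ofList (st.2 ++ [ch])], ([] : List Char)) := by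
  unfold pvStepB; rw [if_pos hc]

theorem pv_stepB_neg (st : List String × List Char) (ch : Char)
    (hc : ch ∉ "BWUX".toList) :
    pvStepB st ch = (st.1, st.2 ++ [ch]) := by
  unfold pvStepB; rw [if_neg hc]

-- Invariant: after n steps the two folds carry the same segments, A's cut index
-- is a Nat m ≤ n, and B's buffer is exactly the characters from m to n.
theorem pv_invariant (s : String) (n : Nat) (hn : n ≤ s.toList.length) :
    ((List.range n).foldl (pvStepA s) ([], 0)).1
      = ((s.toList.take n).foldl pvStepB ([], [])).1 ∧
    ∃ m : Nat, ((List.range n).foldl (pvStepA s) ([], 0)).2 = (m : Int) ∧ m ≤ n ∧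
      ((s.toList.take n).foldl pvStepB ([], [])).2 = (s.toList.take n).drop m := by
  induction n with
  | zero => exact ⟨rfl, 0, rfl, le_refl _, rfl⟩
  | succ n ih =>
    obtain ⟨hseg, m, hm, hmn, hbuf⟩ := ih (Nat.le_of_succ_le hn)
    have hms : m ≤ s.toList.length := hmn.trans (Nat.le_of_succ_le hn)
    have hlt : n < s.toList.length := hn
    have hx : s.toList[n]? = some (s.toList.getD n ' ') := by
      simp [List.getD, List.getElem?_eq_getElem hlt]
    have htake : s.toList.take (n + 1) = s.toList.take n ++ [s.toList.getD n ' '] := by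
      rw [List.take_add_one, hx]; rfl
    have hdrop : (s.toList.take n).drop m ++ [s.toList.getD n ' ']
        = (s.toList.take n ++ [s.toList.getD n ' ']).drop m := by
      rw [List.drop_append_of_le_length (by rw [List.length_take]; exact le_min hmn hms)]
    rw [List.range_succ, List.foldl_append, htake, List.foldl_append]
    simp only [List.foldl_cons, List.foldl_nil]
    by_cases hc : s.toList.getD n ' ' ∈ (['B', 'W', 'U', 'X'] : List Char)
    · rw [pv_stepA_pos s _ n hc, pv_stepB_pos _ _ (by rw [pv_bwux]; exact hc)]
      refine ⟨?_, n + 1, by push_cast; ring, le_refl _, by simp⟩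
      simp only
      rw [hseg, hm]
      congr 2
      -- the slice RLEdata[m : n+1] equals the joined buffer
      apply String.ext
      have h1 : ((n : Int) + 1) = ((n + 1 : Nat) : Int) := by push_cast; ring
      have h2 : (PySem.Str.slice s (some (m : Int)) (some ((n + 1 : Nat) : Int))).toList
          = (s.toList.drop m).take (n + 1 - m) := by
        rw [PySem.Str.toList_slice, PySem.Chars.slice_eq_listSlice, PySem.List.slice_natCast]
      have h3 : ((s.toList.take n).foldl pvStepB ([], [])).2 ++ [s.toList.getD n ' ']
          = (s.toList.take (n + 1)).drop m := by
        rw [hbuf, htake]; exact hdrop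
      have h4 : (s.toList.take (n + 1)).drop m = (s.toList.drop m).take (n + 1 - m) :=
        List.drop_take ..
      have h5 : (String.ofList (((s.toList.take n).foldl pvStepB ([], [])).2
            ++ [s.toList.getD n ' '])).toList
          = ((s.toList.take n).foldl pvStepB ([], [])).2 ++ [s.toList.getD n ' '] := String.toList_ofList
      rw [h5, h1, h2, h3, h4]
    · rw [pv_stepA_neg s _ n hc, pv_stepB_neg _ _ (by rw [pv_bwux]; exact hc)]
      refine ⟨hseg, m, hm, Nat.le_succ_of_le hmn, ?_⟩
      simp only
      rw [hbuf]; exact hdrop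

theorem parseGameDataOfState_eq (s : String) :
    parseGameDataOfState s = parseGameDataOfState_alt s := by
  have hA : parseGameDataOfState s
      = ((List.range s.toList.length).foldl (pvStepA s) ([], 0)).1 := rfl
  have hB : parseGameDataOfState_alt s = (s.toList.foldl pvStepB ([], [])).1 := rfl
  have h := (pv_invariant s s.toList.length (le_refl _)).1
  rw [List.take_length] at h
  rw [hA, hB, h]

-- ===== VERDICT (by name: the statement is the Claim_ definition above) =====
theorem parseGameDataOfState_spec : Claim_equal_parseGameDataOfState := by
  intro s _
  exact parseGameDataOfState_eq s
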